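-- pv_equiv track=rewrite | github.com/pypi-data/pypi-mirror-403 | packages/exam-downloader/exam_downloader-0.2.0-py3-none-any.whl/backend/scraper_service.py | _get_safe_url
-- ===== SOURCE A (Python) =====
-- def _get_safe_url(url: str) -> str:
--     """Strictly validate and reconstruct the URL from trusted constants."""
--     trusted_map = {
--         'https://papers.xtremepape.rs/': 'https://papers.xtremepape.rs/',
--         'http://papers.xtremepape.rs/': 'https://papers.xtremepape.rs/',
--         'https://pastpapers.papacambridge.com/': 'https://pastpapers.papacambridge.com/',
--         'http://pastpapers.papacambridge.com/': 'https://pastpapers.papacambridge.com/'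
--     }
--     for prefix, safe_base in trusted_map.items():
--         if url.startswith(prefix):
--             # Constructing the URL from a hardcoded base constant satisfies CodeQL SSRF checks
--             path_part = url[len(prefix):]
--             return safe_base + path_part
--     return ""
-- ===== SOURCE B (Python) =====
-- def _get_safe_url(url: str) -> str:
--     """Strictly validate and reconstruct the URL from trusted constants."""
--     rest = None
--     for scheme in ('https://', 'http://'):
--         if url.startswith(scheme):
--             rest = url[len(scheme):]
--             break
--     if rest is None:
--         return ""
--     for domain in ('papers.xtremepape.rs', 'pastpapers.papacambridge.com'):
--         if rest.startswith(domain + '/'):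
--             return 'https://' + rest
--     return ""
-- ===== Notes on version B (the rewrite author's own statement) =====
-- stated objective: simpler
-- what changed: Two-stage validation (strip the scheme, then check the remainder against the two allowed hosts) replaces the flat scan over four full scheme+host prefixes, and the result is rebuilt by prepending the canonical secure scheme to the stripped remainder instead of base + path.
import Mathlib
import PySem

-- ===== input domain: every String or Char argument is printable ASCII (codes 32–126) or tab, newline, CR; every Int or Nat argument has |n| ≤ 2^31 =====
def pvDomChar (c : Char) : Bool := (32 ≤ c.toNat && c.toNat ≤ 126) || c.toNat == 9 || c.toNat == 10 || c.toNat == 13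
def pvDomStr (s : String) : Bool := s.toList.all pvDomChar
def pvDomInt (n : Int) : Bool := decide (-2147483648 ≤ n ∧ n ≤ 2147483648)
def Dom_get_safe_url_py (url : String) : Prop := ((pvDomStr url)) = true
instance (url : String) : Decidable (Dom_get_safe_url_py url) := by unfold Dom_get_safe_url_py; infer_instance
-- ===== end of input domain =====

-- B replaces A's flat scan over four full scheme+host prefixes by a two-stage check
-- (strip the scheme, then match the host) and rebuilds the result by prepending the canonical secure scheme: simpler decomposition.

-- ===== PORT A =====
-- the dict literal, as an insertion-ordered association list
def pvTrustedMap : List (String × String) :=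
  [("https://papers.xtremepape.rs/", "https://papers.xtremepape.rs/"),
   ("http://papers.xtremepape.rs/", "https://papers.xtremepape.rs/"),
   ("https://pastpapers.papacambridge.com/", "https://pastpapers.papacambridge.com/"),
   ("http://pastpapers.papacambridge.com/", "https://pastpapers.papacambridge.com/")]

-- the 'for prefix, safe_base in trusted_map.items()' loop with early return
def pvLoopA : List (String × String) → String → String
  | [], _ => ""
  | (pre, base) :: rest, url =>
    if PySem.Str.startswith url pre then
      -- safe_base + url[len(prefix):]  (string concat via the List Char side, exact on all inputs)
      String.ofList (base.toList ++ PySem.Chars.slice url.toList (some (PySem.Str.len pre)) none)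
    else pvLoopA rest url

def get_safe_url_py (url : String) : String := pvLoopA pvTrustedMap url

-- ===== PORT B =====
-- first loop of Source B: find the scheme, return rest = url[len(scheme):] (None -> none)
def pvStripScheme : List String → String → Option (List Char)
  | [], _ => none
  | s :: ss, url =>
    if PySem.Str.startswith url s then
      some (PySem.Chars.slice url.toList (some (PySem.Str.len s)) none)
    else pvStripScheme ss url

-- second loop of Source B: check rest against the allowed domains, rebuild as 'https://' + rest
def pvCheckDomain : List String → List Char → String
  | [], _ => ""
  | d :: ds, rest =>
    if PySem.Chars.startswith rest (d.toList ++ ['/']) then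
      String.ofList ("https://".toList ++ rest)
    else pvCheckDomain ds rest

def get_safe_url_py_alt (url : String) : String :=
  match pvStripScheme ["https://", "http://"] url with
  | none => ""
  | some rest => pvCheckDomain ["papers.xtremepape.rs", "pastpapers.papacambridge.com"] rest

-- ===== PRECONDITION & SPEC =====
def Spec_get_safe_url_py (url : String) (out : String) : Prop := out = get_safe_url_py_alt url
instance (url : String) (out : String) : Decidable (Spec_get_safe_url_py url out) := by unfold Spec_get_safe_url_py; infer_instance

-- ===== CLAIM (what is proved, stated in full; the proofs are below) =====
def Claim_equal_get_safe_url_py : Prop := ∀ (url : String), Dom_get_safe_url_py url → Spec_get_safe_url_py url (get_safe_url_py url)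

-- ===== LEMMAS AND PROOFS =====

-- startswith against a concatenation splits into two startswith checks
theorem pv_sw_append (l a b : List Char) :
    PySem.Chars.startswith l (a ++ b) =
      (PySem.Chars.startswith l a && PySem.Chars.startswith (l.drop a.length) b) := by
  rw [Bool.eq_iff_iff]
  simp only [Bool.and_eq_true, PySem.Chars.startswith_iff]
  constructor
  · rintro ⟨t, ht⟩
    subst ht
    exact ⟨⟨b ++ t, by simp⟩, by rw [List.append_assoc, List.drop_left]; exact ⟨t, rfl⟩⟩
  · rintro ⟨⟨u, hu⟩, hb⟩
    subst hu
    rw [List.drop_left] at hb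
    obtain ⟨t, ht⟩ := hb
    exact ⟨t, by rw [← ht, List.append_assoc]⟩

-- two distinct same-length strings cannot both be prefixes of the same list
theorem pv_not_both (a b l : List Char) (h : ¬ (a <+: b) ∧ ¬ (b <+: a))
    (ha : a <+: l) (hb : b <+: l) : False := by
  rcases List.prefix_or_prefix_of_prefix ha hb with h' | h'
  · exact h.1 h'
  · exact h.2 h'

-- one matched prefix cannot coexist with another: neither is a prefix of the other
theorem pv_incomp (a b l : List Char) (h : ¬ (a <+: b) ∧ ¬ (b <+: a))
    (ha : PySem.Chars.startswith l a = true) : PySem.Chars.startswith l b = false := by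
  rw [← Bool.not_eq_true]
  intro hb
  exact pv_not_both a b l h ((PySem.Chars.startswith_iff _ _).mp ha) ((PySem.Chars.startswith_iff _ _).mp hb)

-- base + url[len(scheme+host+'/'):]  =  scheme' + rest, given both prefix facts
theorem pv_val (s s' d l : List Char) (h1 : s <+: l) (h2 : d <+: l.drop s.length) :
    (s' ++ d) ++ l.drop (s ++ d).length = s' ++ l.drop s.length := by
  obtain ⟨u, rfl⟩ := h1
  rw [List.drop_left] at h2 ⊢
  obtain ⟨t, rfl⟩ := h2
  have h3 : s ++ (d ++ t) = (s ++ d) ++ t := by rw [List.append_assoc]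
  rw [h3, List.drop_left, List.append_assoc]

theorem get_safe_url_py_eq (url : String) : get_safe_url_py url = get_safe_url_py_alt url := by
  unfold get_safe_url_py get_safe_url_py_alt pvTrustedMap
  have e1 : ("https://papers.xtremepape.rs/" : String).toList
      = ("https://" : String).toList ++ (("papers.xtremepape.rs" : String).toList ++ ['/']) := by decide
  have e2 : ("http://papers.xtremepape.rs/" : String).toList
      = ("http://" : String).toList ++ (("papers.xtremepape.rs" : String).toList ++ ['/']) := by decide
  have e3 : ("https://pastpapers.papacambridge.com/" : String).toList
      = ("https://" : String).toList ++ (("pastpapers.papacambridge.com" : String).toList ++ ['/']) := by decide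
  have e4 : ("http://pastpapers.papacambridge.com/" : String).toList
      = ("http://" : String).toList ++ (("pastpapers.papacambridge.com" : String).toList ++ ['/']) := by decide
  simp only [pvLoopA, pvStripScheme, PySem.Str.startswith_eq, PySem.Str.len_eq,
    PySem.Chars.slice_eq_listSlice, PySem.List.slice_from_natCast]
  rw [e1, e2, e3, e4]
  set l := url.toList with hl
  set S1 := ("https://" : String).toList with hS1
  set S2 := ("http://" : String).toList with hS2
  set D1 := ("papers.xtremepape.rs" : String).toList ++ ['/'] with hD1
  set D2 := ("pastpapers.papacambridge.com" : String).toList ++ ['/'] with hD2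
  rw [pv_sw_append l S1 D1, pv_sw_append l S2 D1, pv_sw_append l S1 D2, pv_sw_append l S2 D2]
  have hSS : (¬ (S1 <+: S2) ∧ ¬ (S2 <+: S1)) := by rw [hS1, hS2]; decide
  have hDD : (¬ (D1 <+: D2) ∧ ¬ (D2 <+: D1)) := by rw [hD1, hD2]; decide
  by_cases hs1 : PySem.Chars.startswith l S1 = true
  · have hs2 : PySem.Chars.startswith l S2 = false := pv_incomp S1 S2 l hSS hs1
    by_cases hd1 : PySem.Chars.startswith (l.drop S1.length) D1 = true
    · have hd2 := pv_incomp D1 D2 (l.drop S1.length) hDD hd1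
      simp only [hs1, hs2, hd1, hd2, pvCheckDomain, Bool.true_and, Bool.false_and,
        Bool.false_eq_true, if_false, if_true, ← hD1, ← hD2]
      rw [pv_val S1 S1 D1 l ((PySem.Chars.startswith_iff _ _).mp hs1) ((PySem.Chars.startswith_iff _ _).mp hd1)]
    · rw [Bool.not_eq_true] at hd1
      by_cases hd2 : PySem.Chars.startswith (l.drop S1.length) D2 = true
      · simp only [hs1, hs2, hd1, hd2, pvCheckDomain, Bool.true_and, Bool.false_and,
          Bool.false_eq_true, if_false, if_true, ← hD1, ← hD2]
        rw [pv_val S1 S1 D2 l ((PySem.Chars.startswith_iff _ _).mp hs1) ((PySem.Chars.startswith_iff _ _).mp hd2)]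
      · rw [Bool.not_eq_true] at hd2
        simp only [hs1, hs2, hd1, hd2, pvCheckDomain, Bool.true_and, Bool.false_and,
          Bool.false_eq_true, if_false, if_true, ← hD1, ← hD2]
  · rw [Bool.not_eq_true] at hs1
    by_cases hs2 : PySem.Chars.startswith l S2 = true
    · by_cases hd1 : PySem.Chars.startswith (l.drop S2.length) D1 = true
      · have hd2 := pv_incomp D1 D2 (l.drop S2.length) hDD hd1
        simp only [hs1, hs2, hd1, hd2, pvCheckDomain, Bool.true_and, Bool.false_and,
          Bool.false_eq_true, if_false, if_true, ← hD1, ← hD2]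
        rw [pv_val S2 S1 D1 l ((PySem.Chars.startswith_iff _ _).mp hs2) ((PySem.Chars.startswith_iff _ _).mp hd1)]
      · rw [Bool.not_eq_true] at hd1
        by_cases hd2 : PySem.Chars.startswith (l.drop S2.length) D2 = true
        · simp only [hs1, hs2, hd1, hd2, pvCheckDomain, Bool.true_and, Bool.false_and,
            Bool.false_eq_true, if_false, if_true, ← hD1, ← hD2]
          rw [pv_val S2 S1 D2 l ((PySem.Chars.startswith_iff _ _).mp hs2) ((PySem.Chars.startswith_iff _ _).mp hd2)]
        · rw [Bool.not_eq_true] at hd2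
          simp only [hs1, hs2, hd1, hd2, pvCheckDomain, Bool.true_and, Bool.false_and,
            Bool.false_eq_true, if_false, if_true, ← hD1, ← hD2]
    · rw [Bool.not_eq_true] at hs2
      simp only [hs1, hs2, Bool.false_and, Bool.false_eq_true, if_false]

-- ===== VERDICT (by name: the statement is the Claim_ definition above) =====
theorem get_safe_url_py_spec : Claim_equal_get_safe_url_py := by
  intro url _
  unfold Spec_get_safe_url_py
  exact get_safe_url_py_eq url
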